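-- pv_equiv track=rewrite | github.com/femrebora/vcf-merger | vcf_utils.py | sort_vcf_files
-- ===== SOURCE A (Python) =====
-- PRIORITY_ORDER = ['.MU.vcf', '.FB.vcf', '.HC.vcf', '.ST.vcf', '.DV.vcf']
--
-- def sort_vcf_files(vcf_files: list[str]) -> list[str]:
--     """Sort VCF files by caller priority (MU > FB > HC > ST > DV)."""
--     vcf_files.sort(
--         key=lambda x: next(
--             (i for i, ext in enumerate(PRIORITY_ORDER) if ext in x),
--             len(PRIORITY_ORDER),   # unknown callers go last
--         )
--     )
--     return vcf_files
-- ===== SOURCE B (Python) =====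
-- PRIORITY_ORDER = ['.MU.vcf', '.FB.vcf', '.HC.vcf', '.ST.vcf', '.DV.vcf']
--
-- def sort_vcf_files(vcf_files: list[str]) -> list[str]:
--     """Bucket-collect by caller priority instead of sorting: one pass per
--     priority class appends matching files in input order, so the result is
--     exactly the stable sort by priority index."""
--     n = len(PRIORITY_ORDER)
--
--     def key_of(f):
--         for i, ext in enumerate(PRIORITY_ORDER):
--             if ext in f:
--                 return i
--         return n
--
--     result = []
--     for i in range(n + 1):
--         for f in vcf_files:
--             if key_of(f) == i:
--                 result.append(f)
--     vcf_files[:] = result  # same in-place mutation as A's .sort()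
--     return vcf_files
-- ===== Notes on version B (the rewrite author's own statement) =====
-- stated objective: alternative
-- what changed: Replaces the stable comparison sort keyed by priority index with a bucket collection: one pass per priority class (6 passes total) appends matching files in input order and the classes are concatenated, then written back in place.
import Mathlib
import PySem

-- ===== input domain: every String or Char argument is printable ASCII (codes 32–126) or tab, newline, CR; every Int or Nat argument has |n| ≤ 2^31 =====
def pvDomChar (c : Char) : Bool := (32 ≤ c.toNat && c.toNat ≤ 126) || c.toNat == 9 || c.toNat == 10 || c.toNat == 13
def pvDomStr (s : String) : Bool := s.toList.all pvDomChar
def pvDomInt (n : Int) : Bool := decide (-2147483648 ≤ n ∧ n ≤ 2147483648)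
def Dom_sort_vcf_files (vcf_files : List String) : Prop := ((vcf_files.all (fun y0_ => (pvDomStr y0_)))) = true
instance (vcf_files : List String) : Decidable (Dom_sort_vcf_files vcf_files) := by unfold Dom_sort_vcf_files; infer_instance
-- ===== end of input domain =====

-- B replaces A's stable sort by priority-index key with a bucket collection (one pass per priority class, classes concatenated); objective: alternative.
-- Both Pythons mutate the argument list identically (A via .sort(), B via slice assignment); the theorems are about the return value.

-- ===== PORT A =====
def PRIORITY_ORDER : List String := [".MU.vcf", ".FB.vcf", ".HC.vcf", ".ST.vcf", ".DV.vcf"]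

-- key=lambda x: next((i for i, ext in enumerate(PRIORITY_ORDER) if ext in x), len(PRIORITY_ORDER))
def pvKeyA (x : String) : Int :=
  match (PySem.List.enumerate PRIORITY_ORDER).find? (fun p => PySem.Str.isIn p.2 x) with
  | some p => p.1
  | none => (PRIORITY_ORDER.length : Int)

def sort_vcf_files (vcf_files : List String) : List String :=
  PySem.List.sorted vcf_files pvKeyA

-- ===== PORT B =====
-- key_of: loop over enumerate(PRIORITY_ORDER), return i on the first substring hit, else n
def pvKeyBGo (f : String) : List (Int × String) → Int
  | [] => (PRIORITY_ORDER.length : Int)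
  | (i, ext) :: rest => if PySem.Str.isIn ext f then i else pvKeyBGo f rest

def pvKeyB (f : String) : Int := pvKeyBGo f (PySem.List.enumerate PRIORITY_ORDER)

def sort_vcf_files_alt (vcf_files : List String) : List String :=
  (PySem.List.pyRange 0 ((PRIORITY_ORDER.length : Int) + 1) 1).foldl
    (fun result i =>
      vcf_files.foldl (fun result f => if pvKeyB f == i then result ++ [f] else result) result)
    []

-- ===== PRECONDITION & SPEC =====
def Spec_sort_vcf_files (vcf_files : List String) (out : List String) : Prop := out = sort_vcf_files_alt vcf_files
instance (vcf_files : List String) (out : List String) : Decidable (Spec_sort_vcf_files vcf_files out) := by unfold Spec_sort_vcf_files; infer_instance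

-- ===== CLAIM (what is proved, stated in full; the proofs are below) =====
def Claim_equal_sort_vcf_files : Prop := ∀ (vcf_files : List String), Dom_sort_vcf_files vcf_files → Spec_sort_vcf_files vcf_files (sort_vcf_files vcf_files)

-- ===== LEMMAS AND PROOFS =====

-- concatenation of the key-classes of l, one per value in vs, in order
def pvCat {α : Type} (k : α → Int) (vs : List Int) (l : List α) : List α :=
  vs.foldr (fun i acc => l.filter (fun s => k s == i) ++ acc) []

theorem pvCat_cons {α : Type} (k : α → Int) (i : Int) (vs : List Int) (l : List α) :
    pvCat k (i :: vs) l = l.filter (fun s => k s == i) ++ pvCat k vs l := rfl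

theorem pvCat_nil {α : Type} (k : α → Int) (vs : List Int) : pvCat k vs [] = [] := by
  induction vs with
  | nil => rfl
  | cons i vs ih => simpa [pvCat_cons] using ih

theorem mem_pvCat {α : Type} (k : α → Int) (vs : List Int) (l : List α) (y : α)
    (hy : y ∈ pvCat k vs l) : k y ∈ vs := by
  induction vs with
  | nil => simp [pvCat] at hy
  | cons i vs ih =>
    rw [pvCat_cons, List.mem_append] at hy
    rcases hy with h | h
    · have := (List.mem_filter.mp h).2
      simp at this
      simp [this]
    · exact List.mem_cons_of_mem _ (ih h)

theorem pvCat_append_not_mem {α : Type} (k : α → Int) (x : α) :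
    ∀ (vs : List Int) (l : List α), k x ∉ vs → pvCat k vs (l ++ [x]) = pvCat k vs l := by
  intro vs
  induction vs with
  | nil => intro l _; rfl
  | cons j vs ih =>
    intro l h
    have h1 : k x ≠ j := fun e => h (List.mem_cons.mpr (Or.inl e))
    have h2 : k x ∉ vs := fun e => h (List.mem_cons.mpr (Or.inr e))
    have hj : (k x == j) = false := by simp [h1]
    rw [pvCat_cons, pvCat_cons, List.filter_append, ih l h2]
    simp [hj]

theorem insertBy_split {α : Type} (before : α → α → Bool) (x : α) :
    ∀ (P S : List α), (∀ y ∈ P, before x y = false) → (∀ y ∈ S, before x y = true) →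
      PySem.List.insertBy before x (P ++ S) = P ++ x :: S := by
  intro P
  induction P with
  | nil =>
    intro S _ hS
    cases S with
    | nil => rfl
    | cons y ys => simp [PySem.List.insertBy, hS y (by simp)]
  | cons p P' ih =>
    intro S hP hS
    have hp : before x p = false := hP p (by simp)
    simp [PySem.List.insertBy, hp, ih S (fun y hy => hP y (by simp [hy])) hS]

theorem insertBy_append_left {α : Type} (before : α → α → Bool) (x : α) :
    ∀ (P S : List α), (∀ y ∈ P, before x y = false) →
      PySem.List.insertBy before x (P ++ S) = P ++ PySem.List.insertBy before x S := by
  intro P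
  induction P with
  | nil => intro S _; simp
  | cons p P' ih =>
    intro S hP
    have hp : before x p = false := hP p (by simp)
    simp [PySem.List.insertBy, hp, ih S (fun y hy => hP y (by simp [hy]))]

theorem insert_pvCat {α : Type} (k : α → Int) (x : α) :
    ∀ (vs : List Int) (l : List α), vs.Pairwise (· < ·) → k x ∈ vs →
      PySem.List.insertBy (fun a b => decide (k a < k b)) x (pvCat k vs l) =
        pvCat k vs (l ++ [x]) := by
  intro vs
  induction vs with
  | nil => intro l _ hx; simp at hx
  | cons i vs ih =>
    intro l hs hx
    have hlt : ∀ j ∈ vs, i < j := (List.pairwise_cons.mp hs).1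
    have hfilt : ∀ y ∈ l.filter (fun s => k s == i), k y = i := by
      intro y hy
      have := (List.mem_filter.mp hy).2
      simpa using this
    by_cases hxi : k x = i
    · have hP : ∀ y ∈ l.filter (fun s => k s == i), decide (k x < k y) = false := by
        intro y hy; simp [hfilt y hy, hxi]
      have hS : ∀ y ∈ pvCat k vs l, decide (k x < k y) = true := by
        intro y hy
        have := hlt _ (mem_pvCat k vs l y hy)
        simp [hxi]; omega
      have hnot : k x ∉ vs := fun h => absurd (hlt _ h) (by omega)
      rw [pvCat_cons, insertBy_split _ x _ _ hP hS, pvCat_cons, List.filter_append,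
        pvCat_append_not_mem k x vs l hnot]
      have hbeq : (k x == i) = true := by simp [hxi]
      simp [hbeq]
    · have hxvs : k x ∈ vs := by
        rcases List.mem_cons.mp hx with h | h
        · exact absurd h hxi
        · exact h
      have hxgt : i < k x := hlt _ hxvs
      have hP : ∀ y ∈ l.filter (fun s => k s == i), decide (k x < k y) = false := by
        intro y hy; simp [hfilt y hy]; omega
      have hbeq : (k x == i) = false := by simp [hxi]
      rw [pvCat_cons, insertBy_append_left _ x _ _ hP, ih l (List.Pairwise.of_cons hs) hxvs,
        pvCat_cons, List.filter_append]
      simp [hbeq]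

theorem pvKeyB_eq (f : String) : pvKeyB f = pvKeyA f := by
  unfold pvKeyB pvKeyA PRIORITY_ORDER
  simp only [PySem.List.enumerate_cons, PySem.List.enumerate_nil]
  simp [pvKeyBGo, List.find?]
  split_ifs <;> simp_all [PRIORITY_ORDER]

theorem pvKeyA_mem (f : String) : pvKeyA f ∈ [(0 : Int), 1, 2, 3, 4, 5] := by
  rw [← pvKeyB_eq]
  unfold pvKeyB PRIORITY_ORDER
  simp only [PySem.List.enumerate_cons, PySem.List.enumerate_nil]
  simp [pvKeyBGo]
  split_ifs <;> simp_all [PRIORITY_ORDER]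

theorem sortA_eq_pvCat (xs : List String) :
    sort_vcf_files xs = pvCat pvKeyA [0, 1, 2, 3, 4, 5] xs := by
  unfold sort_vcf_files
  rw [PySem.List.sorted_eq_foldl_insertBy]
  induction xs using List.reverseRecOn with
  | nil => rw [List.foldl_nil, pvCat_nil]
  | append_singleton l x ih =>
    rw [List.foldl_append, List.foldl_cons, List.foldl_nil, ih]
    exact insert_pvCat pvKeyA x [0, 1, 2, 3, 4, 5] l (by decide) (pvKeyA_mem x)

theorem sortB_eq_pvCat (xs : List String) :
    sort_vcf_files_alt xs = pvCat pvKeyA [0, 1, 2, 3, 4, 5] xs := by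
  unfold sort_vcf_files_alt
  have hr : PySem.List.pyRange 0 ((PRIORITY_ORDER.length : Int) + 1) 1 =
      [0, 1, 2, 3, 4, 5] := by decide
  rw [hr]
  simp only [List.foldl_cons, List.foldl_nil]
  have hstep : ∀ (i : Int) (acc : List String),
      xs.foldl (fun result f => if pvKeyB f == i then result ++ [f] else result) acc =
        acc ++ xs.filter (fun s => pvKeyA s == i) := by
    intro i acc
    rw [PySem.List.foldl_append_if_eq_filter]
    congr 1
    exact List.filter_congr (fun s _ => by rw [pvKeyB_eq])
  simp only [hstep, List.nil_append, pvCat, List.foldr_cons, List.foldr_nil,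
    List.append_nil, List.append_assoc]

-- ===== VERDICT (by name: the statement is the Claim_ definition above) =====
theorem sort_vcf_files_spec : Claim_equal_sort_vcf_files := by
  intro vcf_files _
  unfold Spec_sort_vcf_files
  rw [sortA_eq_pvCat, sortB_eq_pvCat]
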